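-- pv_equiv track=rewrite | github.com/aprove-developers/SiRop | nt_solver.py | find_second_largest_pairs
-- ===== SOURCE A (Python) =====
-- def find_second_largest_pairs(keys, i_max, o_max, d_p):
--   """
--   Takes a list keys which are io pairs, values i_max and o_max and the boolean d_p.
--   Returns both second largest pairs in keys.
--   """
--   first_pair = [0, 0]
--   first_pair[0] = max([0]+[i for (i, o) in keys if i < i_max])
--   first_pair[1] = max([o for (i, o) in keys])
--
--   second_pair = [i_max, 0]
--   if d_p:
--     second_pair[1] = max([0]+[o for (i, o) in keys if i == i_max and o < o_max])
--   elif not d_p: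
--     o_list = [o for (i, o) in keys if i == i_max and o > o_max]
--     if len(o_list) == 0: second_pair[1] = 0
--     else: second_pair[1] = min(o_list)
--
--   return first_pair, second_pair
-- ===== SOURCE B (Python) =====
-- def find_second_largest_pairs(keys, i_max, o_max, d_p):
--   """One-pass re-implementation: running accumulators replace the four filtered comprehensions."""
--   if not keys:
--     raise ValueError("max() arg is an empty sequence")
--   best_i = 0       # max i with i < i_max, floored at 0
--   max_o = None     # max o over all pairs
--   sec_lt = 0       # max o with i == i_max and o < o_max, floored at 0
--   sec_gt = None    # min o with i == i_max and o > o_max, if any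
--   for i, o in keys:
--     if i < i_max and best_i < i:
--       best_i = i
--     if max_o is None or max_o < o:
--       max_o = o
--     if i == i_max:
--       if o < o_max and sec_lt < o:
--         sec_lt = o
--       if o > o_max and (sec_gt is None or o < sec_gt):
--         sec_gt = o
--   second = sec_lt if d_p else (0 if sec_gt is None else sec_gt)
--   return [best_i, max_o], [i_max, second]
-- ===== Notes on version B (the rewrite author's own statement) =====
-- stated objective: alternative
-- what changed: Replaced the four filtered list comprehensions with a single loop over keys maintaining running max/min accumulators (best_i, max_o, sec_lt, sec_gt).
import Mathlib
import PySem

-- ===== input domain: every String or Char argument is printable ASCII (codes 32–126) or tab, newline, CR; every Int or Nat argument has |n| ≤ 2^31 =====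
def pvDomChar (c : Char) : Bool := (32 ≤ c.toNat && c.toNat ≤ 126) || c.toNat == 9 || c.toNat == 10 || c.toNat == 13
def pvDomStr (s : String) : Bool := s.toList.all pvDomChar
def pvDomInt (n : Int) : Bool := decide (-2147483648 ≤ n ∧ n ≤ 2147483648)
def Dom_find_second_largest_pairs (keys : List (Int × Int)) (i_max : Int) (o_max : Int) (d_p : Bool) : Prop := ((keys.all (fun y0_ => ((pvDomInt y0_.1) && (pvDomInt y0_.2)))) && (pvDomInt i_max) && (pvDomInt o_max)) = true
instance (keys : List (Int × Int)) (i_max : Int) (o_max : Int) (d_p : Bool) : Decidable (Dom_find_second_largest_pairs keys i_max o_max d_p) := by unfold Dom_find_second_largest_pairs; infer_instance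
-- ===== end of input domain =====

-- B replaces A's four filtered comprehensions by one loop with running accumulators (objective: alternative, same O(n) cost).

-- ===== PORT A =====
def find_second_largest_pairs (keys : List (Int × Int)) (i_max : Int) (o_max : Int) (d_p : Bool) : List Int × List Int :=
  let fp0 := (PySem.List.max? ((0:Int) :: ((keys.filter (fun p => decide (p.1 < i_max))).map Prod.fst)) (fun y => y)).getD 0
  let fp1 := (PySem.List.max? (keys.map Prod.snd) (fun y => y)).getD 0   -- empty keys: Python raises ValueError; excluded by Pre_
  let sp1 :=
    if d_p then
      (PySem.List.max? ((0:Int) :: ((keys.filter (fun p => decide (p.1 = i_max ∧ p.2 < o_max))).map Prod.snd)) (fun y => y)).getD 0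
    else
      let o_list := (keys.filter (fun p => decide (p.1 = i_max ∧ o_max < p.2))).map Prod.snd
      if o_list.length = 0 then 0
      else (PySem.List.min? o_list (fun y => y)).getD 0
  ([fp0, fp1], [i_max, sp1])

-- ===== PORT B =====
-- loop body of B: state = (best_i, max_o, sec_lt, sec_gt)
def pvLoopB (i_max o_max : Int) (st : Int × Option Int × Int × Option Int) (x : Int × Int) :
    Int × Option Int × Int × Option Int :=
  match st with
  | (bi, mo, sl, sg) =>
    let bi' := if x.1 < i_max ∧ bi < x.1 then x.1 else bi
    let mo' := match mo with
      | none => some x.2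
      | some m => if m < x.2 then some x.2 else some m
    if x.1 = i_max then
      let sl' := if x.2 < o_max ∧ sl < x.2 then x.2 else sl
      let sg' := if o_max < x.2 then
          (match sg with
           | none => some x.2
           | some m => if x.2 < m then some x.2 else some m)
        else sg
      (bi', mo', sl', sg')
    else (bi', mo', sl, sg)

def find_second_largest_pairs_alt (keys : List (Int × Int)) (i_max : Int) (o_max : Int) (d_p : Bool) : List Int × List Int :=
  match keys.foldl (pvLoopB i_max o_max) (0, none, 0, none) with
  | (bi, mo, sl, sg) =>
    let second := if d_p then sl else (match sg with | none => 0 | some m => m)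
    ([bi, mo.getD 0], [i_max, second])   -- mo = none only on empty keys (outside Pre_); B raises there too

-- ===== PRECONDITION & SPEC =====
-- Pre_ excludes only keys = [], where A raises ValueError (max of an empty sequence); B raises as well.
def Pre_find_second_largest_pairs (keys : List (Int × Int)) (i_max : Int) (o_max : Int) (d_p : Bool) : Prop := keys ≠ []
instance (keys : List (Int × Int)) (i_max : Int) (o_max : Int) (d_p : Bool) : Decidable (Pre_find_second_largest_pairs keys i_max o_max d_p) := by unfold Pre_find_second_largest_pairs; infer_instance
def pvWitness_find_second_largest_pairs : (List (Int × Int)) × Int × Int × Bool := ([(1, 2)], 1, 2, true)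

def Spec_find_second_largest_pairs (keys : List (Int × Int)) (i_max : Int) (o_max : Int) (d_p : Bool) (out : List Int × List Int) : Prop := out = find_second_largest_pairs_alt keys i_max o_max d_p
instance (keys : List (Int × Int)) (i_max : Int) (o_max : Int) (d_p : Bool) (out : List Int × List Int) : Decidable (Spec_find_second_largest_pairs keys i_max o_max d_p out) := by unfold Spec_find_second_largest_pairs; infer_instance

-- ===== CLAIM (what is proved, stated in full; the proofs are below) =====
def Claim_equal_find_second_largest_pairs : Prop := ∀ (keys : List (Int × Int)) (i_max : Int) (o_max : Int) (d_p : Bool), Dom_find_second_largest_pairs keys i_max o_max d_p → Pre_find_second_largest_pairs keys i_max o_max d_p → Spec_find_second_largest_pairs keys i_max o_max d_p (find_second_largest_pairs keys i_max o_max d_p)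

-- ===== LEMMAS AND PROOFS =====

-- running max / min on an Option accumulator (the shapes B's loop maintains)
def optMax (a : Option Int) (l : List Int) : Option Int :=
  l.foldl (fun a o => match a with | none => some o | some m => if m < o then some o else some m) a

def optMin (a : Option Int) (l : List Int) : Option Int :=
  l.foldl (fun a o => match a with | none => some o | some m => if o < m then some o else some m) a

theorem if_max (a b : Int) : (if a < b then b else a) = max a b := by
  rw [max_def]; split_ifs <;> omega

theorem if_min (a b : Int) : (if b < a then b else a) = min a b := by
  rw [min_def]; split_ifs <;> omega

theorem optMax_some (l : List Int) (m : Int) : optMax (some m) l = some (l.foldl max m) := by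
  induction l generalizing m with
  | nil => rfl
  | cons h t ih =>
      simp only [optMax, List.foldl] at *
      rw [← apply_ite some, if_max m h]
      exact ih (max m h)

theorem optMin_some (l : List Int) (m : Int) : optMin (some m) l = some (l.foldl min m) := by
  induction l generalizing m with
  | nil => rfl
  | cons h t ih =>
      simp only [optMin, List.foldl] at *
      rw [← apply_ite some, if_min m h]
      exact ih (min m h)

theorem loopB_eq (i_max o_max : Int) (l : List (Int × Int)) (bi sl : Int) (mo sg : Option Int) :
    l.foldl (pvLoopB i_max o_max) (bi, mo, sl, sg) =
      ( ((l.filter (fun p => decide (p.1 < i_max))).map Prod.fst).foldl max bi,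
        optMax mo (l.map Prod.snd),
        ((l.filter (fun p => decide (p.1 = i_max ∧ p.2 < o_max))).map Prod.snd).foldl max sl,
        optMin sg ((l.filter (fun p => decide (p.1 = i_max ∧ o_max < p.2))).map Prod.snd) ) := by
  induction l generalizing bi sl mo sg with
  | nil => rfl
  | cons h t ih =>
      simp only [List.foldl, List.filter, List.map]
      rw [show List.foldl (pvLoopB i_max o_max) (pvLoopB i_max o_max (bi, mo, sl, sg) h) t
            = List.foldl (pvLoopB i_max o_max)
                ((if h.1 < i_max ∧ bi < h.1 then h.1 else bi),
                 (match mo with | none => some h.2 | some m => if m < h.2 then some h.2 else some m),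
                 (if h.1 = i_max ∧ h.2 < o_max ∧ sl < h.2 then h.2 else sl),
                 (if h.1 = i_max ∧ o_max < h.2 then
                    (match sg with | none => some h.2 | some m => if h.2 < m then some h.2 else some m)
                  else sg)) t by
            unfold pvLoopB; split_ifs with h1 <;> simp_all <;> split_ifs <;> simp_all <;> omega]
      rw [ih]
      by_cases h1 : h.1 < i_max <;> by_cases h2 : h.1 = i_max <;>
        by_cases h3 : h.2 < o_max <;> by_cases h4 : o_max < h.2 <;>
        simp [h1, h2, h3, h4, optMax, optMin, if_max, List.foldl]

-- ===== VERDICT (by name: the statement is the Claim_ definition above) =====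
theorem optMax_none_cons (x : Int) (l : List Int) : optMax none (x :: l) = optMax (some x) l := rfl

theorem optMin_none_cases (l : List Int) :
    optMin none l = (match l with | [] => none | h :: t => some (t.foldl min h)) := by
  cases l with
  | nil => rfl
  | cons h t => simp only [optMin, List.foldl]; exact optMin_some t h

theorem find_second_largest_pairs_spec : Claim_equal_find_second_largest_pairs := by
  intro keys i_max o_max d_p _ hpre
  unfold Spec_find_second_largest_pairs find_second_largest_pairs find_second_largest_pairs_alt
  obtain ⟨h, t, rfl⟩ : ∃ h t, keys = h :: t := by
    cases keys with
    | nil => exact absurd rfl hpre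
    | cons h t => exact ⟨h, t, rfl⟩
  rw [loopB_eq]
  simp only [PySem.List.max?_id_cons, Option.getD_some, List.map]
  refine Prod.ext ?_ ?_
  · -- first pair
    simp only [optMax_none_cons, optMax_some, Option.getD_some]
  · -- second pair
    cases d_p with
    | true => rfl
    | false =>
      simp only [Bool.false_eq_true, if_false]
      rw [optMin_none_cases]
      cases hl : (List.filter (fun p => decide (p.1 = i_max ∧ o_max < p.2)) (h :: t)).map Prod.snd with
      | nil => rfl
      | cons x xs =>
        rw [PySem.List.min?_id_cons]
        simp
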